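-- pv_equiv track=rewrite | github.com/77pixel/2N_sms_gateway | sms2ngateway.py | pdu_decode
-- ===== SOURCE A (Python) =====
-- def pdu_decode(string):
--     n = 0
--     bignum = 0
--     for c in string:
--         septet = ord(c)
--         bignum |= septet << n
--         n += 7
--     m = 0
--     l = []
--     ret = ""
--     while n > 0:
--         mask = 0xFF << m
--         l.append((bignum & mask) >> m)
--
--         if len(hex(l[-1])) > 3:
--             ret = ret + (hex(l[-1])[-2:])
--         else:
--             ret = ret +"0"+ (hex(l[-1])[-1:])
--         m += 8
--         n -= 8
--     return ret
-- ===== SOURCE B (Python) =====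
-- def pdu_decode(string):
--     # Streaming bit-buffer: emit each byte as soon as 8 bits are available (single pass).
--     buf = 0
--     bits = 0
--     out = []
--     for c in string:
--         buf |= ord(c) << bits
--         bits += 7
--         if bits >= 8:
--             out.append("%02x" % (buf & 0xFF))
--             buf >>= 8
--             bits -= 8
--     if bits > 0:
--         out.append("%02x" % buf)
--     return "".join(out)
-- ===== Notes on version B (the rewrite author's own statement) =====
-- stated objective: faster
-- what changed: B replaces A's two-phase O(L^2) scheme (build one 7L-bit bignum by ever-larger shifted ORs, then re-extract every byte with ever-larger masks and shifts) with a single pass keeping only a small (<15-bit) buffer that emits each hex byte as soon as 8 bits are available.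
import Mathlib
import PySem

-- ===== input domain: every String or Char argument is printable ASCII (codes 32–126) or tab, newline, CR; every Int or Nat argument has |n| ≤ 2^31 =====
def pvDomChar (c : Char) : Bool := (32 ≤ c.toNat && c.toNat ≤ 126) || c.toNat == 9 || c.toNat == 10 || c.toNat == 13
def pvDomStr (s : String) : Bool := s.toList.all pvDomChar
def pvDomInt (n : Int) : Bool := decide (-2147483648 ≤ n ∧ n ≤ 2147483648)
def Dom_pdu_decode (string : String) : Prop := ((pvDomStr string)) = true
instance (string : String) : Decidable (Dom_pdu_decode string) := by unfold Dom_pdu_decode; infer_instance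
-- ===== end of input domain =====

-- B replaces A's whole-number accumulation (a bignum of 7·len bits rebuilt bit-mask by
-- bit-mask) with a single-pass small bit-buffer that emits each byte as soon as 8 bits
-- are available (objective: faster, asymptotic).


-- ===== PORT A =====
-- lowercase hex digit character (shared rendering primitive of Python's hex()/%x)
def hexDigit (d : Nat) : Char := if d < 10 then Char.ofNat (48 + d) else Char.ofNat (87 + d)

-- digits of n in base 16 (hand port of the digit part of Python's hex(), exact for n ≥ 0)
def hexDigits (n : Nat) : List Char :=
  if _h : n < 16 then [hexDigit n]
  else hexDigits (n / 16) ++ [hexDigit (n % 16)]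
termination_by n
decreasing_by exact Nat.div_lt_self (by omega) (by omega)

-- hex(v) for v ≥ 0: "0x" followed by the digits (hand port, exact for nonnegative v)
def pyHexChars (v : Nat) : List Char := '0' :: 'x' :: hexDigits v

-- the while-loop of A: state (n, m, l, ret), iterating while n > 0
def aLoop (bignum : Nat) : Nat → Nat → List Nat → List Char → List Char
  | n, m, l, ret =>
    if _h : 0 < n then
      let mask := 255 <<< m
      let l' := l ++ [(bignum &&& mask) >>> m]
      let last := PySem.List.pyGetD l' (-1) 0        -- l[-1]
      let ret' :=
        if 3 < (pyHexChars last).length then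
          ret ++ PySem.List.slice (pyHexChars last) (some (-2)) none      -- hex(l[-1])[-2:]
        else
          ret ++ '0' :: PySem.List.slice (pyHexChars last) (some (-1)) none  -- "0" + hex(l[-1])[-1:]
      aLoop bignum (n - 8) (m + 8) l' ret'
    else ret
termination_by n => n
decreasing_by omega

def pdu_decode (string : String) : String :=
  let st := string.toList.foldl
    (fun (st : Nat × Nat) c => (st.1 ||| (c.toNat <<< st.2), st.2 + 7)) (0, 0)
  String.ofList (aLoop st.1 st.2 0 [] [])

-- ===== PORT B =====
-- "%02x" % v  (hand port: two lowercase hex digits; exact for 0 ≤ v < 256, the only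
-- values B ever formats)
def hex2 (v : Nat) : List Char := [hexDigit (v / 16), hexDigit (v % 16)]

-- B's single pass: state (out, buf, bits); emit a byte whenever 8 bits are buffered
def bLoop : List Char → List (List Char) × Nat × Nat → List (List Char) × Nat × Nat
  | [], st => st
  | c :: rest, (out, buf, bits) =>
    let buf' := buf ||| (c.toNat <<< bits)
    let bits' := bits + 7
    if 8 ≤ bits' then
      bLoop rest (out ++ [hex2 (buf' &&& 255)], buf' >>> 8, bits' - 8)
    else
      bLoop rest (out, buf', bits')

def pdu_decode_alt (string : String) : String :=
  let st := bLoop string.toList ([], 0, 0)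
  let out := if 0 < st.2.2 then st.1 ++ [hex2 st.2.1] else st.1
  String.ofList out.flatten

-- ===== PRECONDITION & SPEC =====
def Spec_pdu_decode (string : String) (out : String) : Prop := out = pdu_decode_alt string
instance (string : String) (out : String) : Decidable (Spec_pdu_decode string out) := by unfold Spec_pdu_decode; infer_instance

-- ===== CLAIM (what is proved, stated in full; the proofs are below) =====
def Claim_equal_pdu_decode : Prop := ∀ (string : String), Dom_pdu_decode string → Spec_pdu_decode string (pdu_decode string)

-- ===== LEMMAS AND PROOFS =====

-- the packed value both programs encode: little-endian base-128 value of the char codes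
def pvVal : List Char → Nat
  | [] => 0
  | c :: r => c.toNat + 128 * pvVal r

-- the byte stream both programs render: low byte first, while n bits remain
def bytesOf : Nat → Nat → List Nat
  | x, n =>
    if _h : 0 < n then (x &&& 255) :: bytesOf (x >>> 8) (n - 8) else []
termination_by _ n => n
decreasing_by omega

def render (x n : Nat) : List Char := ((bytesOf x n).map hex2).flatten

theorem lor_shl (a b k : Nat) (h : a < 2^k) : a ||| (b <<< k) = a + b * 2^k := by
  apply Nat.eq_of_testBit_eq
  intro i
  simp only [Nat.testBit_lor, Nat.testBit_shiftLeft]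
  by_cases hi : k ≤ i
  · obtain ⟨j, rfl⟩ := Nat.exists_eq_add_of_le hi
    have ha : a.testBit (k + j) = false :=
      Nat.testBit_lt_two_pow (lt_of_lt_of_le h (Nat.pow_le_pow_right (by omega) (by omega)))
    have hb : (a + b * 2 ^ k).testBit (k + j) = b.testBit j := by
      rw [Nat.add_comm k j, Nat.testBit_add, Nat.add_mul_div_right _ _ (Nat.two_pow_pos k),
        Nat.div_eq_of_lt h, Nat.zero_add]
    simp [hb, ha, hi]
  · have h1 : (a + b * 2 ^ k).testBit i = ((a + b * 2 ^ k) % 2 ^ k).testBit i := by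
      rw [Nat.testBit_mod_two_pow]; simp [Nat.lt_of_not_le hi]
    rw [h1, Nat.add_mul_mod_self_right, Nat.mod_eq_of_lt h]
    simp [hi]

theorem and255 (x : Nat) : x &&& 255 = x % 256 := by
  simpa using Nat.and_two_pow_sub_one_eq_mod x 8

theorem hexDigits_lt (b : Nat) (h : b < 16) : hexDigits b = [hexDigit b] := by
  rw [hexDigits]; simp [h]

theorem hexDigits_ge (b : Nat) (h1 : 16 ≤ b) (h2 : b < 256) :
    hexDigits b = [hexDigit (b / 16), hexDigit (b % 16)] := by
  rw [hexDigits]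
  simp only [dif_neg (by omega : ¬ b < 16)]
  rw [hexDigits_lt _ (by omega)]
  rfl

-- A's hex-rendering chunk produces exactly "%02x" for a byte
theorem chunkA (ret : List Char) (b : Nat) (h : b < 256) :
    (if 3 < (pyHexChars b).length then
        ret ++ PySem.List.slice (pyHexChars b) (some (-2)) none
      else ret ++ '0' :: PySem.List.slice (pyHexChars b) (some (-1)) none) = ret ++ hex2 b := by
  by_cases hb : b < 16
  · rw [pyHexChars, hexDigits_lt b hb]
    rw [if_neg (by simp)]
    rw [PySem.List.slice_from_neg_one]
    have : hexDigit (b / 16) = '0' := by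
      rw [Nat.div_eq_of_lt hb]; rfl
    simp [hex2, this, Nat.mod_eq_of_lt hb]
  · rw [pyHexChars, hexDigits_ge b (by omega) h]
    rw [if_pos (by simp)]
    rw [PySem.List.slice_from_neg_ofNat _ 2 (by omega)]
    simp [hex2]

theorem bytesOf_pos (x n : Nat) (h : 0 < n) :
    bytesOf x n = (x &&& 255) :: bytesOf (x >>> 8) (n - 8) := by
  rw [bytesOf]; simp [h]

theorem render_pos (x n : Nat) (h : 0 < n) :
    render x n = hex2 (x &&& 255) ++ render (x >>> 8) (n - 8) := by
  rw [render, bytesOf_pos x n h]; simp [render]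

theorem aLoop_eq : ∀ (n : Nat) (bignum m : Nat) (l : List Nat) (ret : List Char),
    aLoop bignum n m l ret = ret ++ render (bignum >>> m) n := by
  intro n
  induction n using Nat.strong_induction_on with
  | _ n ih =>
    intro bignum m l ret
    rw [aLoop]
    by_cases h : 0 < n
    · simp only [dif_pos h, PySem.List.pyGetD_neg_one_append_singleton]
      rw [ih (n - 8) (by omega)]
      have hb : (bignum &&& 255 <<< m) >>> m = (bignum >>> m) &&& 255 := by
        rw [Nat.shiftRight_and_distrib, Nat.shiftLeft_shiftRight]
      rw [hb, chunkA ret _ (by have := Nat.and_le_right (n := bignum >>> m) (m := 255); omega)]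
      rw [render_pos _ n h, Nat.shiftRight_add]
      simp
    · simp only [dif_neg h]
      have : n = 0 := by omega
      subst this
      rw [render, bytesOf]
      simp

-- A's accumulation loop computes the base-128 value (with 7·len bits counted)
theorem foldA_eq (cs : List Char) : ∀ (acc n : Nat),
    (∀ c ∈ cs, c.toNat < 128) → acc < 2 ^ n →
    cs.foldl (fun (st : Nat × Nat) c => (st.1 ||| (c.toNat <<< st.2), st.2 + 7)) (acc, n)
      = (acc + 2 ^ n * pvVal cs, n + 7 * cs.length) := by
  induction cs with
  | nil => intro acc n _ _; simp [pvVal]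
  | cons c r ih =>
    intro acc n hc hlt
    have hcc : c.toNat < 128 := hc c (by simp)
    simp only [List.foldl_cons]
    rw [lor_shl _ _ _ hlt]
    rw [ih (acc + c.toNat * 2 ^ n) (n + 7) (fun d hd => hc d (by simp [hd]))
        (by have : (2:Nat) ^ (n + 7) = 2 ^ n * 128 := by ring
            nlinarith [Nat.two_pow_pos n])]
    simp only [pvVal, List.length_cons, Prod.mk.injEq]
    constructor <;> ring

-- the value B's final flush renders (the definiens of pdu_decode_alt after the loop)
def bPost (st : List (List Char) × Nat × Nat) : List Char :=
  (if 0 < st.2.2 then st.1 ++ [hex2 st.2.1] else st.1).flatten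

theorem bLoop_eq : ∀ (cs : List Char) (out : List (List Char)) (buf bits : Nat),
    (∀ c ∈ cs, c.toNat < 128) → buf < 2 ^ bits → bits < 8 →
    bPost (bLoop cs (out, buf, bits))
      = out.flatten ++ render (buf + 2 ^ bits * pvVal cs) (bits + 7 * cs.length) := by
  intro cs
  induction cs with
  | nil =>
    intro out buf bits _ hlt hbits
    rw [bLoop, bPost]
    simp only [pvVal, List.length_nil, Nat.mul_zero, Nat.add_zero]
    by_cases h : 0 < bits
    · rw [if_pos h, render_pos buf bits h]
      have h8 : buf < 256 := by
        have : (2:Nat) ^ bits ≤ 2 ^ 8 := Nat.pow_le_pow_right (by omega) (by omega)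
        omega
      have hb : buf &&& 255 = buf := by rw [and255, Nat.mod_eq_of_lt h8]
      have hz : render (buf >>> 8) (bits - 8) = [] := by
        have e : bits - 8 = 0 := by omega
        rw [e, render, bytesOf]
        simp
      simp [hb, hz]
    · rw [if_neg h]
      have hb0 : bits = 0 := by omega
      subst hb0
      have : buf = 0 := by omega
      subst this
      rw [render, bytesOf]
      simp
  | cons c r ih =>
    intro out buf bits hc hlt hbits
    have hcc : c.toNat < 128 := hc c (by simp)
    have hr : ∀ d ∈ r, d.toNat < 128 := fun d hd => hc d (by simp [hd])
    rw [bLoop]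
    rw [lor_shl _ _ _ hlt]
    have hbuf' : buf + c.toNat * 2 ^ bits < 2 ^ (bits + 7) := by
      have : (2:Nat) ^ (bits + 7) = 2 ^ bits * 128 := by ring
      nlinarith [Nat.two_pow_pos bits]
    by_cases h8 : 8 ≤ bits + 7
    · rw [if_pos h8]
      have hb1 : 1 ≤ bits := by omega
      have hdiv : (buf + c.toNat * 2 ^ bits) >>> 8 < 2 ^ (bits + 7 - 8) := by
        rw [Nat.shiftRight_eq_div_pow]
        apply Nat.div_lt_of_lt_mul
        have : (2:Nat) ^ (bits + 7 - 8) * 2 ^ 8 = 2 ^ (bits + 7) := by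
          rw [← pow_add]; congr 1; omega
        omega
      rw [ih _ _ _ hr hdiv (by omega)]
      -- now identify the two renders
      have hX : buf + 2 ^ bits * pvVal (c :: r)
          = (buf + c.toNat * 2 ^ bits) + 256 * (2 ^ (bits - 1) * pvVal r) := by
        simp only [pvVal]
        have h2 : (256 : Nat) * 2 ^ (bits - 1) = 2 ^ bits * 128 := by
          have : bits - 1 + 8 = bits + 7 := by omega
          calc (256 : Nat) * 2 ^ (bits - 1) = 2 ^ (bits - 1 + 8) := by ring
            _ = 2 ^ (bits + 7) := by rw [this]
            _ = 2 ^ bits * 128 := by ring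
        calc buf + 2 ^ bits * (c.toNat + 128 * pvVal r)
            = buf + c.toNat * 2 ^ bits + (2 ^ bits * 128) * pvVal r := by ring
          _ = buf + c.toNat * 2 ^ bits + 256 * (2 ^ (bits - 1) * pvVal r) := by rw [← h2]; ring
      rw [render_pos (buf + 2 ^ bits * pvVal (c :: r)) _ (by omega)]
      have hand : (buf + 2 ^ bits * pvVal (c :: r)) &&& 255
          = (buf + c.toNat * 2 ^ bits) &&& 255 := by
        rw [and255, and255, hX, Nat.add_mul_mod_self_left]
      have hshift : (buf + 2 ^ bits * pvVal (c :: r)) >>> 8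
          = (buf + c.toNat * 2 ^ bits) >>> 8 + 2 ^ (bits + 7 - 8) * pvVal r := by
        rw [Nat.shiftRight_eq_div_pow, Nat.shiftRight_eq_div_pow, hX]
        show (buf + c.toNat * 2 ^ bits + 256 * (2 ^ (bits - 1) * pvVal r)) / 2 ^ 8
            = (buf + c.toNat * 2 ^ bits) / 2 ^ 8 + 2 ^ (bits + 7 - 8) * pvVal r
        have h256 : (2:Nat) ^ 8 = 256 := by norm_num
        have hbits' : bits + 7 - 8 = bits - 1 := by omega
        rw [h256, hbits', Nat.mul_comm 256 (2 ^ (bits - 1) * pvVal r), Nat.add_mul_div_right _ _ (by omega : 0 < 256)]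
      rw [hand, hshift]
      have hlen : bits + 7 - 8 + 7 * r.length = bits + 7 * (c :: r).length - 8 := by
        simp [List.length_cons]; omega
      rw [hlen]
      simp
    · rw [if_neg h8]
      have hb0 : bits = 0 := by omega
      subst hb0
      have hbuf0 : buf = 0 := by omega
      subst hbuf0
      rw [ih _ _ _ hr (by simpa using hbuf') (by omega)]
      have e1 : (0:Nat) + c.toNat * 2 ^ 0 + 2 ^ (0 + 7) * pvVal r = 0 + 2 ^ 0 * pvVal (c :: r) := by
        simp only [pvVal]; ring
      have e2 : 0 + 7 + 7 * r.length = 0 + 7 * (c :: r).length := by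
        simp only [List.length_cons]; ring
      rw [e1, e2]

theorem dom_chars (s : String) (h : Dom_pdu_decode s) : ∀ c ∈ s.toList, c.toNat < 128 := by
  intro c hc
  unfold Dom_pdu_decode pvDomStr at h
  rw [List.all_eq_true] at h
  have := h c hc
  unfold pvDomChar at this
  simp at this
  omega

-- ===== VERDICT (by name: the statement is the Claim_ definition above) =====
theorem pdu_decode_spec : Claim_equal_pdu_decode := by
  intro s hdom
  have hchars := dom_chars s hdom
  show pdu_decode s = pdu_decode_alt s
  simp only [pdu_decode, pdu_decode_alt]
  rw [foldA_eq s.toList 0 0 hchars (by norm_num)]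
  rw [aLoop_eq]
  have hB := bLoop_eq s.toList [] 0 0 hchars (by norm_num) (by norm_num)
  rw [bPost] at hB
  rw [hB]
  simp [Nat.shiftRight_zero]
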